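-- pv_equiv track=rewrite | github.com/adam-hollister/LeetCode | hashing/countingelements.py | experimental
-- ===== SOURCE A (Python) =====
-- def experimental(arr:list) -> int:
--     total = 0
--     my_hashmap = {}
--     right = len(arr)-1
--     while right >= 0:
--         x = arr[right]
--         if x in my_hashmap:
--             my_hashmap[x] += 1
--         else:
--             my_hashmap[x] = 1
--         if x+1 in my_hashmap:
--             total += my_hashmap[x+1]
--         right -= 1
--     return total
-- ===== SOURCE B (Python) =====
-- def experimental(arr: list) -> int:
--     # Index-list approach: group positions by value, then for each value v
--     # merge its position list with the position list of v+1, counting pairs p < q.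
--     positions = {}
--     for i, x in enumerate(arr):
--         positions.setdefault(x, []).append(i)
--     total = 0
--     for v, ps in positions.items():
--         qs = positions.get(v + 1)
--         if qs is None:
--             continue
--         k = 0
--         for q in qs:
--             while k < len(ps) and ps[k] < q:
--                 k += 1
--             total += k
--     return total
-- ===== Notes on version B (the rewrite author's own statement) =====
-- stated objective: alternative
-- what changed: A makes one right-to-left pass keeping a running value->count hashmap and adds the suffix count of x+1 at each step; B instead builds a value->sorted-position-list index in one pass and then, per distinct value v, counts pairs p<q by a two-pointer merge of the position lists of v and v+1.
import Mathlib
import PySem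

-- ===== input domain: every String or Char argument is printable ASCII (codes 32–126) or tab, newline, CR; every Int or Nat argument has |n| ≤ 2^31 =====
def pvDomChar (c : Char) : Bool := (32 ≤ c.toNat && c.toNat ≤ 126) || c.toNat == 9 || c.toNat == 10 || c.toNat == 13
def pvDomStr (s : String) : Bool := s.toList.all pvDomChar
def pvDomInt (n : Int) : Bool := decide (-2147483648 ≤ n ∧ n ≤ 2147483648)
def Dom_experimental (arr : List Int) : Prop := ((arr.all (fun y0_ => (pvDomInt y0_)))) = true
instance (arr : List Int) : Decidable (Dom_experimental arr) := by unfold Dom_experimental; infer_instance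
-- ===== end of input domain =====

-- B replaces A's right-to-left counting pass by a value→positions index built once, then counts pairs p<q
-- per value by a two-pointer merge of the sorted position lists (alternative algorithm, similar cost).


-- ===== PORT A =====
-- while right >= 0: x = arr[right]; count x into the dict; total += dict count of x+1; right -= 1
-- (fuel = right+1; arr[right] is always in range, so pyGetD with default 0 is exact under the guard)
def experimentalLoop (arr : List Int) : Nat → Int × PySem.Dict Int Int → Int
  | 0, st => st.1
  | r + 1, (total, m) =>
      let x := PySem.List.pyGetD arr (r : Int) 0
      let m' := if m.contains x then m.modify x 0 (· + 1) else m.insert x 1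
      let total' := if m'.contains (x + 1) then total + m'.getD (x + 1) 0 else total
      experimentalLoop arr r (total', m')

def experimental (arr : List Int) : Int :=
  experimentalLoop arr arr.length (0, PySem.Dict.empty)

-- ===== PORT B =====
-- while k < len(ps) and ps[k] < q: k += 1   (ps[k] is in range under the guard, so pyGetD is exact;
-- the loop advances k towards len(ps), so (len(ps)-k).toNat steps of fuel make the same loop structural)
def experimentalAdvanceGo (ps : List Int) (q : Int) : Nat → Int → Int
  | 0, k => k
  | fuel + 1, k =>
      if k < (ps.length : Int) ∧ PySem.List.pyGetD ps k 0 < q then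
        experimentalAdvanceGo ps q fuel (k + 1)
      else k

def experimentalAdvance (ps : List Int) (q : Int) (k : Int) : Int :=
  experimentalAdvanceGo ps q ((ps.length : Int) - k).toNat k

-- positions.setdefault(x, []).append(i)  =  modify x [] (· ++ [i])
def experimentalPos (arr : List Int) : PySem.Dict Int (List Int) :=
  (PySem.List.enumerate arr).foldl (fun d p => d.modify p.2 [] (· ++ [p.1])) PySem.Dict.empty

def experimental_alt (arr : List Int) : Int :=
  let pos := experimentalPos arr
  pos.items.foldl (fun total vp =>
    match pos.get? (vp.1 + 1) with
    | none => total
    | some qs =>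
        (qs.foldl (fun (st : Int × Int) q =>
            let k := experimentalAdvance vp.2 q st.1
            (k, st.2 + k)) ((0 : Int), total)).2) 0

-- ===== PRECONDITION & SPEC =====
def Spec_experimental (arr : List Int) (out : Int) : Prop := out = experimental_alt arr
instance (arr : List Int) (out : Int) : Decidable (Spec_experimental arr out) := by unfold Spec_experimental; infer_instance

-- ===== CLAIM (what is proved, stated in full; the proofs are below) =====
def Claim_equal_experimental : Prop := ∀ (arr : List Int), Dom_experimental arr → Spec_experimental arr (experimental arr)

-- ===== LEMMAS AND PROOFS =====

-- the common yardstick: number of pairs p < q with arr[q] = arr[p] + 1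
def pairSum : List Int → Int
  | [] => 0
  | x :: r => (r.count (x + 1) : Int) + pairSum r

-- positions of value v in arr (as Python indices, ascending)
def idxs (v : Int) (arr : List Int) : List Int :=
  ((PySem.List.enumerate arr).filter (fun p => p.2 == v)).map (·.1)

---------------------------------------------------------------- A side

lemma loopA_eq (arr : List Int) : ∀ (r : Nat), r ≤ arr.length → ∀ (t : Int) (m : PySem.Dict Int Int),
    (∀ v, m.getD v 0 = ((arr.drop r).count v : Int)) →
    (∀ v, m.contains v = true ↔ (arr.drop r).count v ≠ 0) →
    experimentalLoop arr r (t, m) = t + (pairSum arr - pairSum (arr.drop r)) := by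
  intro r
  induction r with
  | zero => intro _ t m _ _; simp [experimentalLoop]
  | succ r ih =>
    intro hr t m h1 h2
    have hrlen : r < arr.length := hr
    have hx : PySem.List.pyGetD arr (r : Int) 0 = arr[r] := by
      rw [PySem.List.pyGetD_natCast]; exact List.getD_eq_getElem _ _ hrlen
    have hdrop : arr.drop r = arr[r] :: arr.drop (r + 1) := List.drop_eq_getElem_cons hrlen
    show experimentalLoop arr (r + 1) (t, m) = _
    rw [experimentalLoop, hx]
    set x := arr[r] with hxdef
    set m' := if m.contains x then m.modify x 0 (· + 1) else m.insert x 1 with hm'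
    have hcnt : ∀ v, (arr.drop r).count v = (arr.drop (r + 1)).count v + if v = x then 1 else 0 := by
      intro v
      rw [hdrop, List.count_cons]
      by_cases hvx : v = x
      · simp [hvx]
      · simp [hvx, show x ≠ v from fun h => hvx h.symm]
    have hgetD : ∀ v, m'.getD v 0 = ((arr.drop r).count v : Int) := by
      intro v
      by_cases hc : m.contains x = true
      · rw [hm', if_pos hc, PySem.Dict.getD_modify]
        by_cases hvx : v = x
        · subst hvx; rw [if_pos rfl, h1, hcnt]; simp
        · rw [if_neg hvx, h1, hcnt]; simp [hvx]
      · have hx0 : (arr.drop (r + 1)).count x = 0 := by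
          by_contra h
          exact hc ((h2 x).mpr h)
        rw [hm', if_neg hc, PySem.Dict.getD_insert]
        by_cases hvx : v = x
        · subst hvx; rw [if_pos rfl, hcnt, hx0]; simp
        · rw [if_neg hvx, h1, hcnt]; simp [hvx]
    have hcont : ∀ v, m'.contains v = true ↔ (arr.drop r).count v ≠ 0 := by
      intro v
      have hcv : m'.contains v = (v == x || m.contains v) := by
        rw [hm']; split
        · exact PySem.Dict.contains_modify m x v 0 _
        · exact PySem.Dict.contains_insert m x v 1
      rw [hcv, hcnt v]
      by_cases hvx : v = x
      · simp [hvx]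
      · simp [hvx, h2 v]
    have ht' : (if m'.contains (x + 1) then t + m'.getD (x + 1) 0 else t)
        = t + ((arr.drop (r + 1)).count (x + 1) : Int) := by
      have hcx : (arr.drop r).count (x + 1) = (arr.drop (r + 1)).count (x + 1) := by
        rw [hcnt (x + 1)]
        simp [show ¬ (x + 1 = x) by omega]
      by_cases hc : m'.contains (x + 1) = true
      · rw [if_pos hc, hgetD, hcx]
      · rw [if_neg hc]
        have h0 : (arr.drop r).count (x + 1) = 0 := by
          by_contra h
          exact hc ((hcont (x + 1)).mpr h)
        rw [hcx] at h0
        rw [h0]; simp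
    rw [ht']
    rw [ih (Nat.le_of_succ_le hr) _ m' hgetD hcont]
    have hps : pairSum (arr.drop r) = ((arr.drop (r + 1)).count (x + 1) : Int) + pairSum (arr.drop (r + 1)) := by
      rw [hdrop]; rfl
    rw [hps]; ring

lemma A_eq_pairSum (arr : List Int) : experimental arr = pairSum arr := by
  unfold experimental
  rw [loopA_eq arr arr.length le_rfl 0 PySem.Dict.empty]
  · simp [List.drop_length, pairSum]
  · intro v; simp [List.drop_length, PySem.Dict.getD_empty]
  · intro v; simp [List.drop_length, PySem.Dict.contains_empty]

---------------------------------------------------------------- B side: the positions dict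

lemma idxs_pairwise (v : Int) (arr : List Int) : (idxs v arr).Pairwise (· < ·) := by
  unfold idxs
  rw [List.pairwise_map]
  exact (PySem.List.pairwise_lt_enumerate arr 0).filter _

lemma idxs_nil_of_not_mem {w : Int} {arr : List Int} (h : w ∉ arr) : idxs w arr = [] := by
  unfold idxs
  rw [List.filter_eq_nil_iff.mpr, List.map_nil]
  intro p hp
  rcases (PySem.List.mem_enumerate_iff arr 0 p).mp hp with ⟨k, hk, rfl⟩
  simp only [beq_iff_eq]
  intro he
  exact h (he ▸ List.getElem_mem hk)

lemma getD_pos (arr : List Int) (v : Int) : (experimentalPos arr).getD v [] = idxs v arr := by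
  unfold experimentalPos idxs
  have hswap : (PySem.List.enumerate arr).foldl (fun d p => d.modify p.2 [] (· ++ [p.1])) PySem.Dict.empty
      = ((PySem.List.enumerate arr).map (fun p => (p.2, p.1))).foldl
          (fun d p => d.modify p.1 [] (· ++ [p.2])) PySem.Dict.empty := by
    rw [List.foldl_map]
  rw [hswap, PySem.Dict.getD_foldl_modify_append, PySem.Dict.getD_empty]
  rw [List.filter_map, List.map_map]
  rfl

lemma keys_pos (arr : List Int) : (experimentalPos arr).keys = PySem.Set.ofList arr := by
  unfold experimentalPos
  refine Eq.trans (PySem.Dict.keys_foldl_modify_key (PySem.List.enumerate arr) (fun p => p.2)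
    ([] : List Int) (fun _ p => (· ++ [p.1])) PySem.Dict.empty) ?_
  rw [PySem.Dict.keys_empty, PySem.List.map_snd_enumerate]
  rfl

lemma items_pos (arr : List Int) :
    (experimentalPos arr).items = (PySem.List.dedup arr).map (fun v => (v, idxs v arr)) := by
  have hnd : (experimentalPos arr).keys.Nodup := by
    rw [keys_pos]; exact PySem.Set.nodup_ofList arr
  rw [PySem.Dict.items_eq_map_keys _ hnd [], keys_pos, PySem.List.dedup_eq_ofList]
  exact List.map_congr_left (fun v _ => by rw [getD_pos])

lemma get?_pos (arr : List Int) (w : Int) :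
    (experimentalPos arr).get? w = if w ∈ arr then some (idxs w arr) else none := by
  have hnd : (experimentalPos arr).keys.Nodup := by
    rw [keys_pos]; exact PySem.Set.nodup_ofList arr
  by_cases hw : w ∈ arr
  · rw [if_pos hw]
    refine PySem.Dict.get?_of_mem_items _ ?_ hnd
    rw [items_pos]
    exact List.mem_map.mpr ⟨w, (PySem.List.mem_dedup arr w).mpr hw, rfl⟩
  · rw [if_neg hw]
    refine (PySem.Dict.get?_eq_none_iff_not_mem_keys _ _).mpr ?_
    rw [keys_pos]
    simpa [PySem.Set.mem_ofList] using hw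

---------------------------------------------------------------- B side: the two-pointer merge

lemma advanceGo_eq (ps : List Int) (q : Int) (hps : ps.Pairwise (· < ·)) :
    ∀ (fuel : Nat) (k : Int), 0 ≤ k → (ps.length : Int) - k ≤ fuel →
    experimentalAdvanceGo ps q fuel k
      = k + (((ps.drop k.toNat).countP (fun p => decide (p < q))) : Int) := by
  intro fuel
  induction fuel with
  | zero =>
    intro k hk hfuel
    have hnil : ps.drop k.toNat = [] := List.drop_eq_nil_of_le (by omega)
    rw [experimentalAdvanceGo, hnil]; simp
  | succ fuel ih =>
    intro k hk hfuel
    rw [experimentalAdvanceGo]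
    by_cases hguard : k < (ps.length : Int) ∧ PySem.List.pyGetD ps k 0 < q
    · rw [if_pos hguard]
      have hklen : k.toNat < ps.length := by omega
      have hget : PySem.List.pyGetD ps k 0 = ps[k.toNat] := by
        rw [PySem.List.pyGetD_of_nonneg _ _ hk]; exact List.getD_eq_getElem _ _ hklen
      have hdrop : ps.drop k.toNat = ps[k.toNat] :: ps.drop (k.toNat + 1) := List.drop_eq_getElem_cons hklen
      rw [ih (k + 1) (by omega) (by omega)]
      have htn : (k + 1).toNat = k.toNat + 1 := by omega
      rw [htn, hdrop, List.countP_cons]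
      have hd : decide (ps[k.toNat] < q) = true := by
        rw [← hget]; exact decide_eq_true hguard.2
      rw [hd, if_pos rfl]
      push_cast
      ring
    · rw [if_neg hguard]
      by_cases hlen : k < (ps.length : Int)
      · have hklen : k.toNat < ps.length := by omega
        have hget : PySem.List.pyGetD ps k 0 = ps[k.toNat] := by
          rw [PySem.List.pyGetD_of_nonneg _ _ hk]; exact List.getD_eq_getElem _ _ hklen
        have hnotlt : ¬ ps[k.toNat] < q := by
          intro hlt; exact hguard ⟨hlen, hget ▸ hlt⟩
        have hdrop : ps.drop k.toNat = ps[k.toNat] :: ps.drop (k.toNat + 1) := List.drop_eq_getElem_cons hklen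
        have hpw : (ps.drop k.toNat).Pairwise (· < ·) := hps.sublist (List.drop_sublist _ _)
        rw [hdrop] at hpw
        have h0 : (ps.drop k.toNat).countP (fun p => decide (p < q)) = 0 := by
          rw [hdrop, List.countP_eq_zero]
          intro a ha
          rcases List.mem_cons.mp ha with rfl | ha'
          · simpa using hnotlt
          · have := (List.pairwise_cons.mp hpw).1 a ha'
            simp only [decide_eq_true_eq]
            omega
        rw [h0]; simp
      · have hnil : ps.drop k.toNat = [] := List.drop_eq_nil_of_le (by omega)
        rw [hnil]; simp

lemma advance_eq (ps : List Int) (q : Int) : ∀ (k : Int), ps.Pairwise (· < ·) → 0 ≤ k →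
    experimentalAdvance ps q k = k + (((ps.drop k.toNat).countP (fun p => decide (p < q))) : Int) := by
  intro k hps hk
  exact advanceGo_eq ps q hps _ k hk (by omega)


lemma take_countP_lt (q : Int) : ∀ (ps : List Int), ps.Pairwise (· < ·) →
    ∀ p ∈ ps.take (ps.countP (fun p => decide (p < q))), p < q := by
  intro ps hps
  induction ps with
  | nil => simp
  | cons a l ih =>
    rcases List.pairwise_cons.mp hps with ⟨ha, hl⟩
    by_cases haq : a < q
    · rw [List.countP_cons, decide_eq_true haq, if_pos rfl, List.take_succ_cons]
      intro p hp
      rcases List.mem_cons.mp hp with rfl | hp'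
      · exact haq
      · exact ih hl p hp'
    · have h0 : l.countP (fun p => decide (p < q)) = 0 := by
        rw [List.countP_eq_zero]
        intro b hb
        have := ha b hb
        simp only [decide_eq_true_eq]
        omega
      rw [List.countP_cons, h0]
      simp [haq]

lemma countP_split (q : Int) (ps : List Int) (k : Nat) (hk : k ≤ ps.length)
    (h : ∀ p ∈ ps.take k, p < q) :
    ps.countP (fun p => decide (p < q)) = k + (ps.drop k).countP (fun p => decide (p < q)) := by
  conv_lhs => rw [← List.take_append_drop k ps]
  rw [List.countP_append]
  congr 1
  rw [List.countP_eq_length.mpr (fun p hp => decide_eq_true (h p hp))]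
  simp [Nat.min_eq_left hk]

lemma inner_fold (ps : List Int) (hps : ps.Pairwise (· < ·)) :
    ∀ (qs : List Int), qs.Pairwise (· < ·) → ∀ (k t : Int), 0 ≤ k → k.toNat ≤ ps.length →
    (∀ p ∈ ps.take k.toNat, ∀ q ∈ qs, p < q) →
    (qs.foldl (fun (st : Int × Int) q =>
        let k := experimentalAdvance ps q st.1
        (k, st.2 + k)) (k, t)).2
      = t + (qs.map (fun q => ((ps.countP (fun p => decide (p < q))) : Int))).sum := by
  intro qs
  induction qs with
  | nil => intro _ k t _ _ _; simp
  | cons q qs' ih =>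
    intro hqs k t hk hklen hinv
    have hq : ∀ q' ∈ qs', q < q' := (List.pairwise_cons.mp hqs).1
    have hqs' : qs'.Pairwise (· < ·) := (List.pairwise_cons.mp hqs).2
    have hadv : experimentalAdvance ps q k = ((ps.countP (fun p => decide (p < q))) : Int) := by
      rw [advance_eq ps q k hps hk,
        countP_split q ps k.toNat hklen (fun p hp => hinv p hp q List.mem_cons_self)]
      omega
    set c := ps.countP (fun p => decide (p < q)) with hc
    simp only [List.foldl_cons, hadv]
    rw [ih hqs' (c : Int) (t + (c : Int)) (Int.natCast_nonneg c)
      (by rw [Int.toNat_natCast]; exact List.countP_le_length)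
      (by
        rw [Int.toNat_natCast]
        intro p hp q' hq'
        exact lt_trans (take_countP_lt q ps hps p hp) (hq q' hq'))]
    simp only [List.map_cons, List.sum_cons]
    ring

---------------------------------------------------------------- B side: summing

lemma B_eq (arr : List Int) : experimental_alt arr =
    ((PySem.List.dedup arr).map (fun v =>
      ((idxs (v + 1) arr).map (fun q => (((idxs v arr).countP (fun p => decide (p < q))) : Int))).sum)).sum := by
  unfold experimental_alt
  rw [PySem.List.foldl_congr_mem' _ _
    (fun acc vp => acc + ((idxs (vp.1 + 1) arr).map
      (fun q => (((idxs vp.1 arr).countP (fun p => decide (p < q))) : Int))).sum) 0 ?_]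
  · rw [PySem.List.foldl_add, items_pos, List.map_map]
    simp only [zero_add]
    rfl
  · intro vp hvp acc
    rw [items_pos] at hvp
    rcases List.mem_map.mp hvp with ⟨v, hv, rfl⟩
    by_cases hmem : v + 1 ∈ arr
    · rw [get?_pos, if_pos hmem]
      exact inner_fold (idxs v arr) (idxs_pairwise v arr) (idxs (v + 1) arr)
        (idxs_pairwise (v + 1) arr) 0 acc le_rfl (by simp) (by simp)
    · rw [get?_pos, if_neg hmem]
      simp [idxs_nil_of_not_mem hmem]

lemma sum_filter_split (l : List (Int × Int)) (p : Int × Int → Bool) (h : Int × Int → Int) :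
    ((l.filter p).map h).sum + ((l.filter (fun a => !p a)).map h).sum = (l.map h).sum := by
  induction l with
  | nil => simp
  | cons a l ih =>
    by_cases hp : p a = true
    · simp only [List.filter_cons, hp, Bool.not_true, if_true, Bool.false_eq_true, if_false,
        List.map_cons, List.sum_cons]
      omega
    · rw [Bool.not_eq_true] at hp
      simp only [List.filter_cons, hp, Bool.not_false, if_true, Bool.false_eq_true, if_false,
        List.map_cons, List.sum_cons]
      omega

lemma sum_group : ∀ (K : List Int), K.Nodup → ∀ (l : List (Int × Int)) (h : Int × Int → Int),
    (∀ p ∈ l, p.2 ∈ K) →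
    (K.map (fun v => ((l.filter (fun p => p.2 == v)).map h).sum)).sum = (l.map h).sum := by
  intro K
  induction K with
  | nil =>
    intro _ l h hl
    cases l with
    | nil => simp
    | cons p l' => exact absurd (hl p List.mem_cons_self) (List.not_mem_nil)
  | cons v K' ih =>
    intro hnd l h hl
    have hvK' : v ∉ K' := (List.nodup_cons.mp hnd).1
    have hndK' : K'.Nodup := (List.nodup_cons.mp hnd).2
    have hfilter : ∀ w ∈ K', l.filter (fun p => p.2 == w)
        = (l.filter (fun a => !(a.2 == v))).filter (fun p => p.2 == w) := by
      intro w hw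
      have hwv : w ≠ v := fun h => hvK' (h ▸ hw)
      rw [List.filter_filter]
      refine (List.filter_congr ?_).symm
      intro p _
      by_cases hpw : p.2 = w
      · simp [hpw, hwv]
      · simp [hpw]
    have hK'map : K'.map (fun w => ((l.filter (fun p => p.2 == w)).map h).sum)
        = K'.map (fun w => (((l.filter (fun a => !(a.2 == v))).filter (fun p => p.2 == w)).map h).sum) :=
      List.map_congr_left (fun w hw => by rw [hfilter w hw])
    have hl' : ∀ p ∈ l.filter (fun a => !(a.2 == v)), p.2 ∈ K' := by
      intro p hp
      have hpl : p ∈ l := List.mem_of_mem_filter hp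
      have hne : p.2 ≠ v := by simpa using List.of_mem_filter hp
      rcases List.mem_cons.mp (hl p hpl) with hpv | hK'
      · exact absurd hpv hne
      · exact hK'
    rw [List.map_cons, List.sum_cons, hK'map, ih hndK' (l.filter (fun a => !(a.2 == v))) h hl',
      ← sum_filter_split l (fun p => p.2 == v) h]

lemma sum_swap (P : List Int) : ∀ (Q : List Int),
    (Q.map (fun q => ((P.countP (fun p => decide (p < q))) : Int))).sum
      = (P.map (fun p => ((Q.countP (fun q => decide (p < q))) : Int))).sum := by
  induction P with
  | nil => intro Q; simp
  | cons a P' ih =>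
    intro Q
    have hstep : (Q.map (fun q => (((a :: P').countP (fun p => decide (p < q))) : Int))).sum
        = (Q.map (fun q => (if decide (a < q) = true then (1 : Int) else 0)
            + ((P'.countP (fun p => decide (p < q))) : Int))).sum := by
      refine congrArg List.sum (List.map_congr_left fun q _ => ?_)
      rw [List.countP_cons]
      push_cast
      split <;> omega
    rw [hstep]
    have hadd : (Q.map (fun q => (if decide (a < q) = true then (1 : Int) else 0)
            + ((P'.countP (fun p => decide (p < q))) : Int))).sum
        = (Q.map (fun q => if decide (a < q) = true then (1 : Int) else 0)).sum
          + (Q.map (fun q => ((P'.countP (fun p => decide (p < q))) : Int))).sum :=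
      PySem.List.sum_map_add_int Q _ _
    rw [hadd, PySem.List.sum_map_ite_one_zero, ih, List.map_cons, List.sum_cons]

lemma idx_all (w j : Int) : ∀ (l : List Int) (s : Int), j < s →
    (((PySem.List.enumerate l s).filter (fun p => p.2 == w)).map (·.1)).countP (fun q => decide (j < q))
      = l.count w := by
  intro l
  induction l with
  | nil => intro s _; simp [PySem.List.enumerate_nil]
  | cons y r ih =>
    intro s hjs
    rw [PySem.List.enumerate_cons, List.count_cons]
    by_cases hyw : y = w
    · subst hyw
      rw [List.filter_cons_of_pos (by simp), List.map_cons, List.countP_cons, ih (s + 1) (by omega)]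
      simp [hjs]
    · rw [List.filter_cons_of_neg (by simp [hyw]), ih (s + 1) (by omega)]
      rw [beq_eq_false_iff_ne.mpr hyw]
      simp

lemma idx_count (w j : Int) : ∀ (l : List Int) (s : Int), s ≤ j →
    (((PySem.List.enumerate l s).filter (fun p => p.2 == w)).map (·.1)).countP (fun q => decide (j < q))
      = (l.drop (j + 1 - s).toNat).count w := by
  intro l
  induction l with
  | nil => intro s _; simp [PySem.List.enumerate_nil]
  | cons y r ih =>
    intro s hsj
    have hhead : (((PySem.List.enumerate (y :: r) s).filter (fun p => p.2 == w)).map (·.1)).countP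
          (fun q => decide (j < q))
        = (((PySem.List.enumerate r (s + 1)).filter (fun p => p.2 == w)).map (·.1)).countP
          (fun q => decide (j < q)) := by
      rw [PySem.List.enumerate_cons]
      by_cases hyw : (y == w) = true
      · rw [List.filter_cons_of_pos (by simpa using hyw), List.map_cons, List.countP_cons]
        simp [show ¬ j < s by omega]
      · rw [List.filter_cons_of_neg (by simpa using hyw)]
    rw [hhead]
    by_cases hs : s = j
    · rw [idx_all w j r (s + 1) (by omega)]
      have : (j + 1 - s).toNat = 1 := by omega
      rw [this, List.drop_succ_cons, List.drop_zero]
    · rw [ih (s + 1) (by omega)]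
      have h1 : (j + 1 - s).toNat = (j + 1 - (s + 1)).toNat + 1 := by omega
      rw [h1, List.drop_succ_cons]

lemma enum_sum_pairSum : ∀ (l : List Int) (s : Int),
    ((PySem.List.enumerate l s).map (fun p => (((l.drop (p.1 + 1 - s).toNat).count (p.2 + 1)) : Int))).sum
      = pairSum l := by
  intro l
  induction l with
  | nil => intro s; simp [PySem.List.enumerate_nil, pairSum]
  | cons y r ih =>
    intro s
    rw [PySem.List.enumerate_cons, List.map_cons, List.sum_cons]
    have hhead : ((s + 1 - s).toNat : Nat) = 1 := by omega
    have htail : ((PySem.List.enumerate r (s + 1)).map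
          (fun p => ((((y :: r).drop (p.1 + 1 - s).toNat).count (p.2 + 1)) : Int))).sum
        = ((PySem.List.enumerate r (s + 1)).map
          (fun p => (((r.drop (p.1 + 1 - (s + 1)).toNat).count (p.2 + 1)) : Int))).sum := by
      refine congrArg List.sum (List.map_congr_left fun p hp => ?_)
      rcases (PySem.List.mem_enumerate_iff r (s + 1) p).mp hp with ⟨k, hk, rfl⟩
      have h1 : ((s + 1 + (k : Int)) + 1 - s).toNat = ((s + 1 + (k : Int)) + 1 - (s + 1)).toNat + 1 := by
        omega
      rw [h1, List.drop_succ_cons]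
    rw [hhead, htail, ih (s + 1)]
    show ((r.count (y + 1) : Int)) + pairSum r = pairSum (y :: r)
    rfl

lemma B_eq_pairSum (arr : List Int) : experimental_alt arr = pairSum arr := by
  rw [B_eq]
  rw [List.map_congr_left (fun v _ => sum_swap (idxs v arr) (idxs (v + 1) arr))]
  have hstep : ∀ v, ((idxs v arr).map
        (fun p => (((idxs (v + 1) arr).countP (fun q => decide (p < q))) : Int))).sum
      = (((PySem.List.enumerate arr 0).filter (fun p => p.2 == v)).map
          (fun p => (((idxs (p.2 + 1) arr).countP (fun q => decide (p.1 < q))) : Int))).sum := by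
    intro v
    unfold idxs
    rw [List.map_map]
    refine congrArg List.sum (List.map_congr_left fun p hp => ?_)
    have : p.2 = v := by simpa using List.of_mem_filter hp
    simp [this]
  rw [List.map_congr_left (fun v _ => hstep v)]
  rw [sum_group (PySem.List.dedup arr)
    (by rw [PySem.List.dedup_eq_ofList]; exact PySem.Set.nodup_ofList arr)
    (PySem.List.enumerate arr 0)
    (fun p => (((idxs (p.2 + 1) arr).countP (fun q => decide (p.1 < q))) : Int)) ?hl]
  case hl =>
    intro p hp
    rcases (PySem.List.mem_enumerate_iff arr 0 p).mp hp with ⟨k, hk, rfl⟩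
    exact (PySem.List.mem_dedup arr _).mpr (List.getElem_mem hk)
  rw [List.map_congr_left (fun p hp => ?_)]
  · exact enum_sum_pairSum arr 0
  · show (((idxs (p.2 + 1) arr).countP (fun q => decide (p.1 < q))) : Int)
        = (((arr.drop (p.1 + 1 - 0).toNat).count (p.2 + 1)) : Int)
    rcases (PySem.List.mem_enumerate_iff arr 0 p).mp hp with ⟨k, hk, rfl⟩
    have := idx_count (((0 : Int) + (k : Int), arr[k]).2 + 1) ((0 : Int) + (k : Int), arr[k]).1 arr 0 (by simp)
    unfold idxs
    exact_mod_cast this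

-- ===== VERDICT (by name: the statement is the Claim_ definition above) =====
theorem experimental_spec : Claim_equal_experimental := by
  intro arr _
  show experimental arr = experimental_alt arr
  rw [A_eq_pairSum, B_eq_pairSum]
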